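-- pv_equiv track=rewrite | github.com/sanmasanba/atcoder_codes | 競プロ典型90題/level4/070.py | solve
-- ===== SOURCE A (Python) =====
-- def solve(A):
--     l = -10**9; r = 10**9
--     while l + 10**2 < r:
--         mid1 = (2*l+r)//3
--         mid2 = (l+2*r)//3
--         dist1 = sum(abs(i-mid1) for i in A)
--         dist2 = sum(abs(i-mid2) for i in A)
--
--         if dist1 > dist2:
--             l = mid1
--         else:
--             r = mid2
--     return l, r
-- ===== SOURCE B (Python) =====
-- def solve(A):
--     # Sort once, build prefix sums; each distance query becomes a binary
--     # search plus an O(1) prefix-sum formula instead of a full scan of A.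
--     s = sorted(A)
--     n = len(s)
--     pref = [0]
--     acc = 0
--     for x in s:
--         acc += x
--         pref.append(acc)
--     total = pref[n]
--
--     def dist(m):
--         lo, hi = 0, n
--         while lo < hi:
--             md = (lo + hi) // 2
--             if s[md] < m:
--                 lo = md + 1
--             else:
--                 hi = md
--         k = lo
--         return k * m - pref[k] + (total - pref[k]) - (n - k) * m
--
--     l = -10**9; r = 10**9
--     while l + 10**2 < r:
--         mid1 = (2*l+r)//3
--         mid2 = (l+2*r)//3
--         if dist(mid1) > dist(mid2):
--             l = mid1
--         else:
--             r = mid2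
--     return l, r
-- ===== Notes on version B (the rewrite author's own statement) =====
-- stated objective: faster
-- what changed: B sorts A once and builds prefix sums, then answers each of the ternary search's distance queries with a binary search plus an O(1) prefix-sum formula instead of rescanning the whole list twice per iteration.
import Mathlib
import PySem

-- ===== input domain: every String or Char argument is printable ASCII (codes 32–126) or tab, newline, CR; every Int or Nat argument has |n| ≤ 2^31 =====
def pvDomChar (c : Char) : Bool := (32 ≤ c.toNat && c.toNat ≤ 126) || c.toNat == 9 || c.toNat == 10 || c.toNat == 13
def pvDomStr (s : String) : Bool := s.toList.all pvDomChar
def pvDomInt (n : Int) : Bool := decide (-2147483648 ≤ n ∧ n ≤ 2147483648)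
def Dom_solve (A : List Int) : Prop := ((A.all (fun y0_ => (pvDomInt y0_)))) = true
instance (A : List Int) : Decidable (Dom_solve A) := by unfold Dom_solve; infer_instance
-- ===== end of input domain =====

-- B sorts once and answers each distance query from prefix sums + binary search; same returned window.

-- ===== PORT A =====
-- ternary search; each iteration sums |i - mid| over the whole list, twice
-- fuel is only a structural totality guard: from the fixed start window (-10^9, 10^9)
-- the interval shrinks by a factor ~2/3 each step, so far fewer than 128 iterations run
def solveLoop (A : List Int) (fuel : Nat) (l r : Int) : Int × Int :=
  match fuel with
  | 0 => (l, r)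
  | fuel + 1 =>
    if l + 10 ^ 2 < r then
      let mid1 := PySem.Int.floordiv (2 * l + r) 3
      let mid2 := PySem.Int.floordiv (l + 2 * r) 3
      let dist1 := A.foldl (fun acc i => acc + |i - mid1|) 0
      let dist2 := A.foldl (fun acc i => acc + |i - mid2|) 0
      if dist1 > dist2 then solveLoop A fuel mid1 r else solveLoop A fuel l mid2
    else (l, r)

def solve (A : List Int) : Int × Int :=
  solveLoop A 128 (-(10 ^ 9)) (10 ^ 9)

-- ===== PORT B =====
-- hand-written binary search of Source B: leftmost index with s[md] >= m
-- fuel is only a structural totality guard: hi - lo shrinks every step, so fuel = n suffices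
def bsearchLt (s : List Int) (m : Int) (fuel lo hi : Nat) : Nat :=
  match fuel with
  | 0 => lo
  | fuel + 1 =>
    if lo < hi then
      let md := (lo + hi) / 2
      if s.getD md 0 < m then bsearchLt s m fuel (md + 1) hi else bsearchLt s m fuel lo md
    else lo

-- dist(m) of Source B, from the sorted list s, its prefix sums pref, n = len(s), total = pref[n]
def distAlt (s pref : List Int) (n : Nat) (total m : Int) : Int :=
  let k := bsearchLt s m n 0 n
  (k : Int) * m - pref.getD k 0 + (total - pref.getD k 0) - ((n : Int) - (k : Int)) * m

-- same 128-step fuel guard as the A-side loop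
def solveAltLoop (s pref : List Int) (n : Nat) (total : Int) (fuel : Nat) (l r : Int) : Int × Int :=
  match fuel with
  | 0 => (l, r)
  | fuel + 1 =>
    if l + 10 ^ 2 < r then
      let mid1 := PySem.Int.floordiv (2 * l + r) 3
      let mid2 := PySem.Int.floordiv (l + 2 * r) 3
      if distAlt s pref n total mid1 > distAlt s pref n total mid2 then
        solveAltLoop s pref n total fuel mid1 r
      else
        solveAltLoop s pref n total fuel l mid2
    else (l, r)

def solve_alt (A : List Int) : Int × Int :=
  let s := PySem.List.sorted A (fun x => x) false
  let n := s.length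
  let pref := List.scanl (fun a x => a + x) 0 s
  let total := pref.getD n 0
  solveAltLoop s pref n total 128 (-(10 ^ 9)) (10 ^ 9)

-- ===== PRECONDITION & SPEC =====
def Spec_solve (A : List Int) (out : Int × Int) : Prop := out = solve_alt A
instance (A : List Int) (out : Int × Int) : Decidable (Spec_solve A out) := by unfold Spec_solve; infer_instance

-- ===== CLAIM (what is proved, stated in full; the proofs are below) =====
def Claim_equal_solve : Prop := ∀ (A : List Int), Dom_solve A → Spec_solve A (solve A)

-- ===== LEMMAS AND PROOFS =====

-- binary search: the returned k splits s into a strict lower part and an upper part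
theorem bsearchLt_spec (s : List Int) (m : Int) (hs : s.Pairwise (fun a b => a ≤ b)) :
    ∀ fuel lo hi, hi - lo ≤ fuel → lo ≤ hi → hi ≤ s.length →
    (∀ j, j < lo → ∀ hj : j < s.length, s[j] < m) →
    (∀ j, hi ≤ j → ∀ hj : j < s.length, m ≤ s[j]) →
    lo ≤ bsearchLt s m fuel lo hi ∧ bsearchLt s m fuel lo hi ≤ hi ∧
    (∀ j, j < bsearchLt s m fuel lo hi → ∀ hj : j < s.length, s[j] < m) ∧
    (∀ j, bsearchLt s m fuel lo hi ≤ j → ∀ hj : j < s.length, m ≤ s[j]) := by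
  intro fuel
  induction fuel with
  | zero =>
    intro lo hi hf hlh _ hlow hup
    have : lo = hi := by omega
    subst this
    rw [bsearchLt]
    exact ⟨le_refl _, le_refl _, hlow, hup⟩
  | succ f ih =>
    intro lo hi hf hlh hhn hlow hup
    rw [bsearchLt]
    by_cases h : lo < hi
    · simp only [h, if_pos]
      have hmd : (lo + hi) / 2 < hi := by omega
      have hmdlo : lo ≤ (lo + hi) / 2 := by omega
      have hmds : (lo + hi) / 2 < s.length := by omega
      rw [List.getD_eq_getElem s 0 hmds]
      by_cases hc : s[(lo + hi) / 2] < m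
      · simp only [hc, if_pos]
        exact
          have r := ih ((lo + hi) / 2 + 1) hi (by omega) (by omega) hhn
            (fun j hj hjs => by
              by_cases hj2 : j < lo
              · exact hlow j hj2 hjs
              · have hle : s[j] ≤ s[(lo + hi) / 2] := by
                  by_cases he : j = (lo + hi) / 2
                  · subst he; exact le_refl _
                  · exact List.pairwise_iff_getElem.mp hs j _ hjs hmds (by omega)
                exact lt_of_le_of_lt hle hc)
            hup
          ⟨by omega, r.2.1, r.2.2.1, r.2.2.2⟩
      · simp only [hc, if_neg, not_false_iff]
        exact
          have r := ih lo ((lo + hi) / 2) (by omega) (by omega) (by omega) hlow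
            (fun j hj hjs => by
              have hge : s[(lo + hi) / 2] ≤ s[j] := by
                by_cases he : (lo + hi) / 2 = j
                · subst he; exact le_refl _
                · exact List.pairwise_iff_getElem.mp hs _ j hmds hjs (by omega)
              exact le_trans (not_lt.mp hc) hge)
          ⟨r.1, by omega, r.2.2.1, r.2.2.2⟩
    · simp only [h, if_neg, not_false_iff]
      have : lo = hi := by omega
      subst this
      exact ⟨le_refl _, le_refl _, hlow, hup⟩

-- definitional unfolding of distAlt (zeta-reduced)
theorem distAlt_def (s pref : List Int) (n : Nat) (total m : Int) :
    distAlt s pref n total m =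
      ((bsearchLt s m n 0 n : Nat) : Int) * m - pref.getD (bsearchLt s m n 0 n) 0
        + (total - pref.getD (bsearchLt s m n 0 n) 0)
        - ((n : Int) - ((bsearchLt s m n 0 n : Nat) : Int)) * m := rfl

-- sums of |x - m| over an all-below / all-above list are linear in the list's sum
theorem sum_abs_of_lt (l : List Int) (m : Int) (h : ∀ x ∈ l, x < m) :
    (l.map (fun i => |i - m|)).sum = (l.length : Int) * m - l.sum := by
  induction l with
  | nil => simp
  | cons x xs ih =>
    have hx : x < m := h x (List.mem_cons_self)
    have : |x - m| = m - x := by rw [abs_of_nonpos (by omega)]; ring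
    simp only [List.map_cons, List.sum_cons, List.length_cons, this,
      ih (fun y hy => h y (List.mem_cons_of_mem x hy))]
    push_cast
    ring

theorem sum_abs_of_ge (l : List Int) (m : Int) (h : ∀ x ∈ l, m ≤ x) :
    (l.map (fun i => |i - m|)).sum = l.sum - (l.length : Int) * m := by
  induction l with
  | nil => simp
  | cons x xs ih =>
    have hx : m ≤ x := h x (List.mem_cons_self)
    have : |x - m| = x - m := abs_of_nonneg (by omega)
    simp only [List.map_cons, List.sum_cons, List.length_cons, this,
      ih (fun y hy => h y (List.mem_cons_of_mem x hy))]
    push_cast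
    ring

-- Source B's prefix list: pref[k] is the sum of the first k sorted elements
theorem scanl_getD (s : List Int) (a : Int) (k : Nat) (hk : k ≤ s.length) :
    (List.scanl (fun x y => x + y) a s).getD k 0 = a + (s.take k).sum := by
  induction s generalizing a k with
  | nil =>
    have : k = 0 := by simpa using hk
    subst this; simp
  | cons x xs ih =>
    cases k with
    | zero => simp [List.scanl]
    | succ k' =>
      rw [List.scanl_cons, List.getD_cons_succ, List.take_succ_cons, List.sum_cons]
      rw [ih (a + x) k' (by simpa using hk)]
      ring

-- dist(m) of Source B equals the scanned sum of |i - m| over A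
theorem distAlt_eq (s A : List Int) (m : Int) (hp : s.Perm A)
    (hs : s.Pairwise (fun a b => a ≤ b)) :
    distAlt s (List.scanl (fun x y => x + y) 0 s) s.length
      ((List.scanl (fun x y => x + y) 0 s).getD s.length 0) m
      = (A.map (fun i => |i - m|)).sum := by
  obtain ⟨hk0, hkn, hlt, hge⟩ :=
    bsearchLt_spec s m hs s.length 0 s.length (by omega) (by omega) (le_refl _)
      (fun j hj _ => absurd hj (by omega)) (fun j hj hjs => absurd hjs (by omega))
  set k := bsearchLt s m s.length 0 s.length with hkdef
  have hms : (A.map (fun i => |i - m|)).sum = (s.map (fun i => |i - m|)).sum :=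
    (List.Perm.map _ hp.symm).sum_eq
  have hsplit : s = s.take k ++ s.drop k := (List.take_append_drop k s).symm
  have hlen_take : (s.take k).length = k := List.length_take_of_le hkn
  have hlen_drop : (s.drop k).length = s.length - k := List.length_drop
  have htake : ∀ x ∈ s.take k, x < m := by
    intro x hx
    obtain ⟨j, hj, rfl⟩ := List.mem_iff_getElem.mp hx
    rw [List.getElem_take]
    exact hlt j (by omega) _
  have hdrop : ∀ x ∈ s.drop k, m ≤ x := by
    intro x hx
    obtain ⟨j, hj, rfl⟩ := List.mem_iff_getElem.mp hx
    rw [List.getElem_drop]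
    exact hge (k + j) (by omega) _
  have hsum : (s.map (fun i => |i - m|)).sum
      = ((s.take k).map (fun i => |i - m|)).sum + ((s.drop k).map (fun i => |i - m|)).sum := by
    conv_lhs => rw [hsplit]
    rw [List.map_append, List.sum_append]
  have htot : s.take k ++ s.drop k = s := List.take_append_drop k s
  have hsum_td : (s.take k).sum + (s.drop k).sum = s.sum := by
    rw [← List.sum_append, htot]
  rw [hms, hsum, sum_abs_of_lt _ _ htake, sum_abs_of_ge _ _ hdrop]
  rw [distAlt_def, ← hkdef, scanl_getD s 0 k hkn, scanl_getD s 0 s.length (le_refl _), List.take_length]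
  rw [hlen_take, hlen_drop]
  have hcast : ((s.length - k : Nat) : Int) = (s.length : Int) - (k : Int) := by
    omega
  rw [hcast]
  linarith [hsum_td]

-- the two ternary-search loops agree step for step once the distance functions agree
theorem loop_eq (A s pref : List Int) (n : Nat) (total : Int)
    (hd : ∀ m, distAlt s pref n total m = (A.map (fun i => |i - m|)).sum) :
    ∀ fuel l r, solveLoop A fuel l r = solveAltLoop s pref n total fuel l r := by
  intro fuel
  induction fuel with
  | zero => intro l r; rfl
  | succ f ih =>
    intro l r
    rw [solveLoop, solveAltLoop]
    by_cases h : l + 10 ^ 2 < r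
    · simp only [h, if_pos]
      rw [PySem.List.foldl_add, PySem.List.foldl_add]
      simp only [zero_add, ← hd]
      split_ifs with hc
      · exact ih _ _
      · exact ih _ _
    · simp only [h, if_neg, not_false_iff]

-- ===== VERDICT (by name: the statement is the Claim_ definition above) =====
theorem solve_spec : Claim_equal_solve := by
  intro A _
  unfold Spec_solve solve solve_alt
  exact loop_eq A _ _ _ _
    (fun m => distAlt_eq _ A m (PySem.List.sorted_perm A (fun x => x) false)
      (PySem.List.sorted_pairwise A (fun x => x)))
    128 _ _
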